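-- pv_equiv track=rewrite | github.com/brunohadlich/Programming-Studies | algorithms_on_strings/pattern_matching.py | computeCharClasses
-- ===== SOURCE A (Python) =====
-- def computeCharClasses(s, order):
--     len_s = len(s)
--     class_ = [0] * len_s
--     class_[order[0]] = 0
--     for i in range(1, len_s):
--         if s[order[i]] != s[order[i - 1]]:
--             class_[order[i]] = class_[order[i - 1]] + 1
--         else:
--             class_[order[i]] = class_[order[i - 1]]
--     return class_
-- ===== SOURCE B (Python) =====
-- def computeCharClasses(s, order):
--     n = len(s)
--     class_ = [0] * n
--     diffs = [s[b] != s[a] for a, b in zip(order, order[1:n])]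
--     prefix = [0] * n
--     for j in range(1, n):
--         prefix[j] = prefix[j - 1] + diffs[j - 1]
--     for i in range(n):
--         class_[order[i]] = prefix[i]
--     return class_
-- ===== Notes on version B (the rewrite author's own statement) =====
-- stated objective: alternative
-- what changed: A's single pass that writes each class by reading the class just written at the previous rank is replaced by a build-then-scatter decomposition: a list of neighbour-difference flags, a prefix-sum table over it, and a final scatter class_[order[i]] = prefix[i].
import Mathlib
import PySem

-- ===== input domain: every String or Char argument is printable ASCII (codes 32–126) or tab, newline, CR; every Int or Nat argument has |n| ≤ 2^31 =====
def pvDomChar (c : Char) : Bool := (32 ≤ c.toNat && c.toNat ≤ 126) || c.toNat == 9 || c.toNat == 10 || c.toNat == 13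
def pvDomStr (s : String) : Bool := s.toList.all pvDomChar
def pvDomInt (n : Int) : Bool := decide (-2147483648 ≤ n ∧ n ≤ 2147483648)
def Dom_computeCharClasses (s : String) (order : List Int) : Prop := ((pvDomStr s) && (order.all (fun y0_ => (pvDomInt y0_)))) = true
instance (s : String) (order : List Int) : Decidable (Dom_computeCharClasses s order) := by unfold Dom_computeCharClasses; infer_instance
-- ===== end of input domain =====

-- B replaces A's single neighbour-referencing pass by a build-then-scatter decomposition:
-- a difference-flag list, a prefixL-sum table, and a scatter pass (objective: alternative, same cost).


-- ===== PORT A =====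
def computeCharClasses (s : String) (order : List Int) : List Int :=
  let lenS := s.toList.length
  let class0 := List.replicate lenS (0 : Int)
  let class1 := PySem.List.pySetD class0 (PySem.List.pyGetD order 0 0) 0
  (PySem.List.pyRange 1 (lenS : Int)).foldl (fun cl i =>
    if PySem.List.pyGetD s.toList (PySem.List.pyGetD order i 0) ' '
         ≠ PySem.List.pyGetD s.toList (PySem.List.pyGetD order (i - 1) 0) ' ' then
      PySem.List.pySetD cl (PySem.List.pyGetD order i 0)
        (PySem.List.pyGetD cl (PySem.List.pyGetD order (i - 1) 0) 0 + 1)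
    else
      PySem.List.pySetD cl (PySem.List.pyGetD order i 0)
        (PySem.List.pyGetD cl (PySem.List.pyGetD order (i - 1) 0) 0)) class1

-- ===== PORT B =====
def computeCharClasses_alt (s : String) (order : List Int) : List Int :=
  let n := s.toList.length
  let class0 := List.replicate n (0 : Int)
  let diffs := (List.zip order (PySem.List.slice order (some 1) (some (n : Int)))).map
    (fun p => if PySem.List.pyGetD s.toList p.2 ' ' ≠ PySem.List.pyGetD s.toList p.1 ' '
              then (1 : Int) else 0)
  let prefixL := (PySem.List.pyRange 1 (n : Int)).foldl (fun pr j =>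
    PySem.List.pySetD pr j (PySem.List.pyGetD pr (j - 1) 0 + PySem.List.pyGetD diffs (j - 1) 0))
    (List.replicate n (0 : Int))
  (PySem.List.pyRange 0 (n : Int)).foldl (fun cl i =>
    PySem.List.pySetD cl (PySem.List.pyGetD order i 0) (PySem.List.pyGetD prefixL i 0)) class0

-- ===== PRECONDITION & SPEC =====
-- Pre_ excludes exactly the inputs on which A raises IndexError: an empty s (A indexes
-- class_[order[0]] into an empty list), an order shorter than s, or an order entry out of range.
def Pre_computeCharClasses (s : String) (order : List Int) : Prop :=
  s.toList ≠ [] ∧ s.toList.length ≤ order.length ∧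
  ∀ i < s.toList.length, PySem.Raise.InRange s.toList.length (order.getD i 0)
instance (s : String) (order : List Int) : Decidable (Pre_computeCharClasses s order) := by
  unfold Pre_computeCharClasses; infer_instance
def pvWitness_computeCharClasses : String × List Int := ("aba", [0, 2, 1])

def Spec_computeCharClasses (s : String) (order : List Int) (out : List Int) : Prop := out = computeCharClasses_alt s order
instance (s : String) (order : List Int) (out : List Int) : Decidable (Spec_computeCharClasses s order out) := by unfold Spec_computeCharClasses; infer_instance

-- ===== CLAIM (what is proved, stated in full; the proofs are below) =====
def Claim_equal_computeCharClasses : Prop := ∀ (s : String) (order : List Int), Dom_computeCharClasses s order → Pre_computeCharClasses s order → Spec_computeCharClasses s order (computeCharClasses s order)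
-- ===== LEMMAS AND PROOFS =====

-- the Nat index Python's wrapped indexing addresses, for -n ≤ j < n
def pvWrap (n : Nat) (j : Int) : Nat := if 0 ≤ j then j.toNat else n - (-j).toNat

-- the wrapped position order[i] addresses in a list of length |s|
def pvW (cs : List Char) (order : List Int) (i : Nat) : Nat := pvWrap cs.length (order.getD i 0)

-- the character A and B read as s[order[i]]
def pvCh (cs : List Char) (order : List Int) (i : Nat) : Char :=
  PySem.List.pyGetD cs (order.getD i 0) ' '

-- the class value both programs attach to rank i
def pvV (cs : List Char) (order : List Int) : Nat → Int
  | 0 => 0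
  | i + 1 => pvV cs order i + (if pvCh cs order (i + 1) ≠ pvCh cs order i then 1 else 0)

-- the class array after the first m ranks have been scattered
def pvF (cs : List Char) (order : List Int) (m : Nat) : List Int :=
  (List.range m).foldl (fun cl i => cl.set (pvW cs order i) (pvV cs order i))
    (List.replicate cs.length 0)

lemma pvIdx_in {n : Nat} {j : Int} (h : PySem.Raise.InRange n j) :
    PySem.List.pyIdx? n j = some (pvWrap n j) := by
  obtain ⟨h1, h2⟩ := h
  simp [PySem.List.pyIdx?, pvWrap]
  split_ifs <;> simp_all

lemma pvWrap_lt {n : Nat} {j : Int} (h : PySem.Raise.InRange n j) : pvWrap n j < n := by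
  obtain ⟨h1, h2⟩ := h
  simp [pvWrap]; split_ifs <;> omega

lemma pvSetD_in {cl : List Int} {j : Int} (h : PySem.Raise.InRange cl.length j) (v : Int) :
    PySem.List.pySetD cl j v = cl.set (pvWrap cl.length j) v := by
  simp [PySem.List.pySetD, PySem.List.pySet?, pvIdx_in h]

lemma pvGetD_in {cl : List Int} {j : Int} (h : PySem.Raise.InRange cl.length j) (d : Int) :
    PySem.List.pyGetD cl j d = cl.getD (pvWrap cl.length j) d := by
  simp [PySem.List.pyGetD, PySem.List.pyGet?, pvIdx_in h, List.getD]


lemma pvF_succ (cs : List Char) (order : List Int) (m : Nat) :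
    pvF cs order (m + 1) = (pvF cs order m).set (pvW cs order m) (pvV cs order m) := by
  simp [pvF, List.range_succ]

lemma pvF_length (cs : List Char) (order : List Int) (m : Nat) :
    (pvF cs order m).length = cs.length := by
  induction m with
  | zero => simp [pvF]
  | succ m ih => simp [pvF_succ, ih]

lemma pvF_getD_last (cs : List Char) (order : List Int) (m : Nat)
    (h : PySem.Raise.InRange cs.length (order.getD m 0)) :
    (pvF cs order (m + 1)).getD (pvW cs order m) 0 = pvV cs order m := by
  have hlt : pvW cs order m < (pvF cs order m).length := by
    rw [pvF_length]; exact pvWrap_lt h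
  rw [pvF_succ]
  rw [List.getD_eq_getElem _ _ (by simpa using hlt)]
  simp

-- A's loop, named so the lemmas can speak about it
def pvStepA (s : String) (order : List Int) (cl : List Int) (i : Int) : List Int :=
  if PySem.List.pyGetD s.toList (PySem.List.pyGetD order i 0) ' '
       ≠ PySem.List.pyGetD s.toList (PySem.List.pyGetD order (i - 1) 0) ' ' then
    PySem.List.pySetD cl (PySem.List.pyGetD order i 0)
      (PySem.List.pyGetD cl (PySem.List.pyGetD order (i - 1) 0) 0 + 1)
  else
    PySem.List.pySetD cl (PySem.List.pyGetD order i 0)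
      (PySem.List.pyGetD cl (PySem.List.pyGetD order (i - 1) 0) 0)

lemma computeCharClasses_eq_foldl (s : String) (order : List Int) :
    computeCharClasses s order =
      (PySem.List.pyRange 1 (s.toList.length : Int)).foldl (pvStepA s order)
        (PySem.List.pySetD (List.replicate s.toList.length 0) (PySem.List.pyGetD order 0 0) 0) := by
  rfl

lemma pvA_inv (s : String) (order : List Int)
    (hin : ∀ i < s.toList.length, PySem.Raise.InRange s.toList.length (order.getD i 0)) :
    ∀ m, 1 ≤ m → m ≤ s.toList.length →
      (PySem.List.pyRange 1 (m : Int)).foldl (pvStepA s order)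
        (PySem.List.pySetD (List.replicate s.toList.length 0) (PySem.List.pyGetD order 0 0) 0)
      = pvF s.toList order m := by
  intro m
  induction m with
  | zero => omega
  | succ m ih =>
    intro _ hle
    by_cases hm : m = 0
    · subst hm
      have h0 : PySem.Raise.InRange s.toList.length (order.getD 0 0) := hin 0 (by omega)
      have hget0 : PySem.List.pyGetD order (0 : Int) 0 = order.getD 0 0 := by
        have := PySem.List.pyGetD_natCast order 0 (0 : Int)
        simpa using this
      have : PySem.List.pyRange 1 ((1 : Nat) : Int) = [] := by decide
      rw [this]
      simp only [List.foldl_nil]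
      rw [hget0, pvSetD_in (by simpa using h0)]
      simp [pvF, pvV, List.set_replicate_self]
    · have hm1 : 1 ≤ m := by omega
      have hmn : m ≤ s.toList.length := by omega
      have hmlt : m < s.toList.length := by omega
      have hpeel : PySem.List.pyRange 1 ((m + 1 : Nat) : Int)
          = PySem.List.pyRange 1 (m : Int) ++ [(m : Int)] := by
        push_cast
        exact PySem.List.pyRange_one_succ_right (by exact_mod_cast hm1)
      rw [hpeel, List.foldl_append, ih hm1 hmn]
      -- one step
      have hinm : PySem.Raise.InRange s.toList.length (order.getD m 0) := hin m hmlt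
      have hinm1 : PySem.Raise.InRange s.toList.length (order.getD (m - 1) 0) := hin (m - 1) (by omega)
      have hgm : PySem.List.pyGetD order ((m : Nat) : Int) 0 = order.getD m 0 :=
        PySem.List.pyGetD_natCast order m 0
      have hgm1 : PySem.List.pyGetD order (((m : Nat) : Int) - 1) 0 = order.getD (m - 1) 0 := by
        have : ((m : Nat) : Int) - 1 = ((m - 1 : Nat) : Int) := by omega
        rw [this]; exact PySem.List.pyGetD_natCast order (m - 1) 0
      have hlenF : (pvF s.toList order m).length = s.toList.length := pvF_length _ _ _
      have hread : PySem.List.pyGetD (pvF s.toList order m) (order.getD (m - 1) 0) 0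
          = pvV s.toList order (m - 1) := by
        rw [pvGetD_in (by rw [hlenF]; exact hinm1)]
        rw [hlenF]
        have : m = (m - 1) + 1 := by omega
        rw [this] at *
        exact pvF_getD_last s.toList order (m - 1) hinm1
      simp only [List.foldl_cons, List.foldl_nil, pvStepA]
      rw [hgm, hgm1, hread]
      have hset : ∀ v, PySem.List.pySetD (pvF s.toList order m) (order.getD m 0) v
          = (pvF s.toList order m).set (pvW s.toList order m) v := by
        intro v
        rw [pvSetD_in (by rw [hlenF]; exact hinm)]
        rw [hlenF]; rfl
      rw [pvF_succ]
      by_cases hch : pvCh s.toList order m ≠ pvCh s.toList order (m - 1)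
      · rw [if_pos (by simpa [pvCh] using hch), hset]
        congr 1
        have hm' : m = (m - 1) + 1 := by omega
        rw [hm']
        simp [pvV, ← hm', hch]
      · rw [if_neg (by simpa [pvCh] using hch), hset]
        congr 1
        have hm' : m = (m - 1) + 1 := by omega
        rw [hm']
        simp [pvV, ← hm']
        exact not_not.mp hch


-- B's difference-flag list and its prefix loop, named so the lemmas can speak about them
def pvDiffs (s : String) (order : List Int) : List Int :=
  (List.zip order (PySem.List.slice order (some 1) (some (s.toList.length : Int)))).map
    (fun p => if PySem.List.pyGetD s.toList p.2 ' ' ≠ PySem.List.pyGetD s.toList p.1 ' '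
              then (1 : Int) else 0)

def pvStepP (s : String) (order : List Int) (pr : List Int) (j : Int) : List Int :=
  PySem.List.pySetD pr j
    (PySem.List.pyGetD pr (j - 1) 0 + PySem.List.pyGetD (pvDiffs s order) (j - 1) 0)

-- the prefix table after ranks below m are filled
def pvP (cs : List Char) (order : List Int) (m n : Nat) : List Int :=
  (List.range n).map (fun i => if i < m then pvV cs order i else 0)

lemma pvAlt_eq_foldl (s : String) (order : List Int) :
    computeCharClasses_alt s order =
      (PySem.List.pyRange 0 (s.toList.length : Int)).foldl (fun cl i =>
        PySem.List.pySetD cl (PySem.List.pyGetD order i 0)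
          (PySem.List.pyGetD
            ((PySem.List.pyRange 1 (s.toList.length : Int)).foldl (pvStepP s order)
              (List.replicate s.toList.length 0)) i 0))
        (List.replicate s.toList.length 0) := by
  rfl

lemma pvDiffs_getD (s : String) (order : List Int) (j : Nat)
    (hlen : s.toList.length ≤ order.length) (hj : j + 1 < s.toList.length) :
    PySem.List.pyGetD (pvDiffs s order) ((j : Nat) : Int) 0
      = (if pvCh s.toList order (j + 1) ≠ pvCh s.toList order j then 1 else 0) := by
  have hslice : PySem.List.slice order (some 1) (some (s.toList.length : Int))
      = (order.drop 1).take (s.toList.length - 1) := by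
    have h1o : 1 ≤ order.length := by omega
    simp only [String.length_toList] at hlen ⊢
    simp [PySem.List.slice, PySem.List.clampIdx,
          not_lt.mpr (Int.natCast_nonneg s.length),
          Nat.min_eq_left hlen, Nat.min_eq_left h1o, List.drop_one]
  have hjo : j < order.length := by omega
  have hj1o : j + 1 < order.length := by omega
  rw [PySem.List.pyGetD_natCast, pvDiffs, hslice]
  have hjlt : j < ((List.zip order ((order.drop 1).take (s.toList.length - 1)))).length := by
    simp only [List.length_zip, List.length_take, List.length_drop]; omega
  rw [List.getD_eq_getElem _ _ (by simpa using hjlt)]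
  rw [List.getElem_map, List.getElem_zip]
  simp only [List.getElem_take, List.getElem_drop, pvCh]
  simp only [List.getD_eq_getElem _ _ hjo, List.getD_eq_getElem _ _ hj1o, Nat.add_comm]

lemma pvP_one (cs : List Char) (order : List Int) (n : Nat) :
    pvP cs order 1 n = List.replicate n 0 := by
  apply List.ext_getElem (by simp [pvP])
  intro i h1 h2
  simp only [pvP, List.getElem_map, List.getElem_range, List.getElem_replicate]
  by_cases h : i = 0
  · subst h; simp [pvV]
  · simp [show ¬ i < 1 by omega]

lemma pvP_getD (cs : List Char) (order : List Int) (m n i : Nat) (h1 : i < m) (h2 : i < n) :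
    (pvP cs order m n).getD i 0 = pvV cs order i := by
  rw [List.getD_eq_getElem _ _ (by simp [pvP]; omega)]
  simp [pvP, h1]

lemma pvP_set (cs : List Char) (order : List Int) (m n : Nat) (hm : m < n) :
    (pvP cs order m n).set m (pvV cs order m) = pvP cs order (m + 1) n := by
  apply List.ext_getElem (by simp [pvP])
  intro i h1 h2
  by_cases hi : i = m
  · subst hi
    rw [List.getElem_set_self (by simpa [pvP] using hm)]
    simp [pvP]
  · rw [List.getElem_set_ne (by omega)]
    simp only [pvP, List.getElem_map, List.getElem_range]
    have : i < m ↔ i < m + 1 := by omega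
    simp [this]

lemma pvP_inv (s : String) (order : List Int)
    (hlen : s.toList.length ≤ order.length) :
    ∀ m, 1 ≤ m → m ≤ s.toList.length →
      (PySem.List.pyRange 1 (m : Int)).foldl (pvStepP s order)
        (List.replicate s.toList.length 0)
      = pvP s.toList order m s.toList.length := by
  intro m
  induction m with
  | zero => omega
  | succ m ih =>
    intro _ hle
    by_cases hm : m = 0
    · subst hm
      have : PySem.List.pyRange 1 ((1 : Nat) : Int) = [] := by decide
      rw [this, List.foldl_nil, pvP_one]
    · have hm1 : 1 ≤ m := by omega
      have hmlt : m < s.toList.length := by omega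
      have hpeel : PySem.List.pyRange 1 ((m + 1 : Nat) : Int)
          = PySem.List.pyRange 1 (m : Int) ++ [(m : Int)] := by
        push_cast
        exact PySem.List.pyRange_one_succ_right (by exact_mod_cast hm1)
      rw [hpeel, List.foldl_append, ih hm1 (by omega), List.foldl_cons, List.foldl_nil, pvStepP]
      have hcast : ((m : Nat) : Int) - 1 = ((m - 1 : Nat) : Int) := by omega
      rw [hcast, PySem.List.pyGetD_natCast, PySem.List.pySetD_natCast]
      rw [pvP_getD s.toList order m s.toList.length (m - 1) (by omega) (by omega)]
      rw [pvDiffs_getD s order (m - 1) hlen (by omega)]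
      have hm' : m - 1 + 1 = m := by omega
      rw [hm']
      have hv : pvV s.toList order (m - 1)
          + (if pvCh s.toList order m ≠ pvCh s.toList order (m - 1) then 1 else 0)
          = pvV s.toList order m := by
        conv_rhs => rw [show m = (m - 1) + 1 from by omega]
        simp [pvV, hm']
      rw [hv, pvP_set s.toList order m s.toList.length hmlt]

lemma pvB_inv (s : String) (order : List Int)
    (hin : ∀ i < s.toList.length, PySem.Raise.InRange s.toList.length (order.getD i 0)) :
    ∀ m, m ≤ s.toList.length →
      (PySem.List.pyRange 0 (m : Int)).foldl (fun cl i =>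
        PySem.List.pySetD cl (PySem.List.pyGetD order i 0)
          (PySem.List.pyGetD (pvP s.toList order s.toList.length s.toList.length) i 0))
        (List.replicate s.toList.length 0)
      = pvF s.toList order m := by
  intro m
  induction m with
  | zero =>
    intro _
    have : PySem.List.pyRange 0 ((0 : Nat) : Int) = [] := by decide
    rw [this, List.foldl_nil]
    rfl
  | succ m ih =>
    intro hle
    have hpeel : PySem.List.pyRange 0 ((m + 1 : Nat) : Int)
        = PySem.List.pyRange 0 (m : Int) ++ [(m : Int)] := by
      push_cast
      exact PySem.List.pyRange_one_succ_right (by positivity)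
    rw [hpeel, List.foldl_append, ih (by omega), List.foldl_cons, List.foldl_nil]
    rw [PySem.List.pyGetD_natCast order m 0,
        PySem.List.pyGetD_natCast (pvP s.toList order s.toList.length s.toList.length) m 0]
    rw [pvP_getD s.toList order s.toList.length s.toList.length m (by omega) (by omega)]
    rw [pvSetD_in (by rw [pvF_length]; exact hin m (by omega))]
    rw [pvF_length, pvF_succ]
    rfl

-- ===== VERDICT (by name: the statement is the Claim_ definition above) =====
theorem computeCharClasses_spec : Claim_equal_computeCharClasses := by
  intro s order _ hpre
  obtain ⟨hne, hlen, hin⟩ := hpre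
  have hn : 1 ≤ s.toList.length := List.length_pos_of_ne_nil hne
  unfold Spec_computeCharClasses
  rw [computeCharClasses_eq_foldl]
  have hA := pvA_inv s order hin s.toList.length hn le_rfl
  rw [hA]
  rw [pvAlt_eq_foldl]
  rw [pvP_inv s order hlen s.toList.length hn le_rfl]
  rw [pvB_inv s order hin s.toList.length le_rfl]
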